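-- pv_equiv track=rewrite | github.com/SChande1/vverdier | DO Files - Stata/refactored_files/files/101 read EIA nuke v2.py | assign_region
-- ===== SOURCE A (Python) =====
-- def assign_region(plant):
--     region_mapping = {
--         "West": {"Columbia Generating Station": "NW", "Diablo Canyon": "CAL", "Palo Verde": "SW"},
--         "Texas": {"Comanche Peak": "TEX", "South Texas Project": "TEX"},
--         "East": {
--             "Millstone": "NE", "Seabrook": "NE", "Pilgrim Nuclear Power Station": "NE",
--             "Indian Point 2": "NY", "Indian Point 3": "NY", "James A Fitzpatrick": "NY",
--             "R. E. Ginna Nuclear Power Plant": "NY", "Nine Mile Point Nuclear Station": "NY",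
--             "St Lucie": "FLA", "Turkey Point": "FLA",
--             "Cooper": "CENT", "Wolf Creek Generating Station": "CENT",
--             "V C Summer": "CAR", "Harris": "CAR", "Oconee": "CAR", "Catawba": "CAR",
--             "McGuire": "CAR", "H B Robinson": "CAR", "Brunswick": "CAR",
--             "Waterford 3": "MIDW", "Prairie Island": "MIDW", "Point Beach": "MIDW",
--             "Monticello": "MIDW", "Grand Gulf": "MIDW", "Donald C Cook": "MIDW",
--             "Arkansas Nuclear One": "MIDW", "Duane Arnold": "MIDW", "Callaway": "MIDW",
--             "LaSalle Generating Station": "MIDW", "River Bend Station": "MIDW",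
--             "Vogtle": "SE", "Joseph M Farley": "SE", "Edwin I Hatch": "SE",
--             "Sequoyah": "TEN", "Watts Bar Nuclear Plant": "TEN", "Browns Ferry": "TEN"
--         }
--     }
--
--     # This function assigns a region and interconnection to a given plant.
--     # It iterates through the region_mapping dictionary, checking if the plant exists in any region.
--     # If found, it returns the interconnection and the specific region for that plant.
--     # If the plant is not found in any specific region, it defaults to the "East" interconnection and "MIDA" region.
--     for inter, plants in region_mapping.items():
--         if plant in plants:
--             return inter, plants.get(plant, "MIDA")
--     return "East", "MIDA"
-- ===== SOURCE B (Python) =====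
-- # Grouped source data: one row per (interconnection, region code, plants in it);
-- # a flat plant -> (interconnection, region) index is built once at load time,
-- # so each call is a single O(1) dict lookup with default ("East", "MIDA").
-- REGION_GROUPS = [
--     ("West", "NW", ["Columbia Generating Station"]),
--     ("West", "CAL", ["Diablo Canyon"]),
--     ("West", "SW", ["Palo Verde"]),
--     ("Texas", "TEX", ["Comanche Peak", "South Texas Project"]),
--     ("East", "NE", ["Millstone", "Seabrook", "Pilgrim Nuclear Power Station"]),
--     ("East", "NY", ["Indian Point 2", "Indian Point 3", "James A Fitzpatrick",
--                     "R. E. Ginna Nuclear Power Plant", "Nine Mile Point Nuclear Station"]),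
--     ("East", "FLA", ["St Lucie", "Turkey Point"]),
--     ("East", "CENT", ["Cooper", "Wolf Creek Generating Station"]),
--     ("East", "CAR", ["V C Summer", "Harris", "Oconee", "Catawba", "McGuire",
--                      "H B Robinson", "Brunswick"]),
--     ("East", "MIDW", ["Waterford 3", "Prairie Island", "Point Beach", "Monticello",
--                       "Grand Gulf", "Donald C Cook", "Arkansas Nuclear One",
--                       "Duane Arnold", "Callaway", "LaSalle Generating Station",
--                       "River Bend Station"]),
--     ("East", "SE", ["Vogtle", "Joseph M Farley", "Edwin I Hatch"]),
--     ("East", "TEN", ["Sequoyah", "Watts Bar Nuclear Plant", "Browns Ferry"]),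
-- ]
--
-- _INDEX = {p: (inter, code) for inter, code, group in REGION_GROUPS for p in group}
--
--
-- def assign_region(plant):
--     return _INDEX.get(plant, ("East", "MIDA"))
-- ===== Notes on version B (the rewrite author's own statement) =====
-- stated objective: idiomatic
-- what changed: A's per-call scan over region groups with a nested membership test is replaced by grouped (interconnection, region, plant-list) rows flattened once by a comprehension into a plant -> (interconnection, region) index, so each call is a single dict lookup with default ('East','MIDA').
import Mathlib
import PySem

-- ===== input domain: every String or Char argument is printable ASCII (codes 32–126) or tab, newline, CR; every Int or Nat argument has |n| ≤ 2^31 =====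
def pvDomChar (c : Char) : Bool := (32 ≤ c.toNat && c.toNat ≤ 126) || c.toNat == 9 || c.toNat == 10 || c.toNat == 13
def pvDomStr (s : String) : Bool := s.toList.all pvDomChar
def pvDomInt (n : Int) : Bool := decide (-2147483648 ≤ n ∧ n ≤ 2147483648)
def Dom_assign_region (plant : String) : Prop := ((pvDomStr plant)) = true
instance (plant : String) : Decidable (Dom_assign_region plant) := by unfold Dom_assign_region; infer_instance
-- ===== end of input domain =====

-- B replaces A's per-call loop over region groups by grouped rows flattened once into a plant → (interconnection, region) index; each call is one lookup with default (idiomatic).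

-- ===== PORT A =====
def pvRegionMapping : PySem.Dict String (PySem.Dict String String) :=
  PySem.Dict.ofList [
    ("West", PySem.Dict.ofList [("Columbia Generating Station", "NW"), ("Diablo Canyon", "CAL"), ("Palo Verde", "SW")]),
    ("Texas", PySem.Dict.ofList [("Comanche Peak", "TEX"), ("South Texas Project", "TEX")]),
    ("East", PySem.Dict.ofList [("Millstone", "NE"), ("Seabrook", "NE"), ("Pilgrim Nuclear Power Station", "NE"), ("Indian Point 2", "NY"), ("Indian Point 3", "NY"), ("James A Fitzpatrick", "NY"), ("R. E. Ginna Nuclear Power Plant", "NY"), ("Nine Mile Point Nuclear Station", "NY"), ("St Lucie", "FLA"), ("Turkey Point", "FLA"), ("Cooper", "CENT"), ("Wolf Creek Generating Station", "CENT"), ("V C Summer", "CAR"), ("Harris", "CAR"), ("Oconee", "CAR"), ("Catawba", "CAR"), ("McGuire", "CAR"), ("H B Robinson", "CAR"), ("Brunswick", "CAR"), ("Waterford 3", "MIDW"), ("Prairie Island", "MIDW"), ("Point Beach", "MIDW"), ("Monticello", "MIDW"), ("Grand Gulf", "MIDW"), ("Donald C Cook", "MIDW"), ("Arkansas Nuclear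 One", "MIDW"), ("Duane Arnold", "MIDW"), ("Callaway", "MIDW"), ("LaSalle Generating Station", "MIDW"), ("River Bend Station", "MIDW"), ("Vogtle", "SE"), ("Joseph M Farley", "SE"), ("Edwin I Hatch", "SE"), ("Sequoyah", "TEN"), ("Watts Bar Nuclear Plant", "TEN"), ("Browns Ferry", "TEN")])]

-- the for-loop with early return over region_mapping.items()
def pvARLoop (plant : String) : List (String × PySem.Dict String String) → String × String
  | [] => ("East", "MIDA")
  | (inter, plants) :: rest =>
      if plants.contains plant then (inter, plants.getD plant "MIDA")
      else pvARLoop plant rest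

def assign_region (plant : String) : String × String :=
  pvARLoop plant pvRegionMapping.items

-- ===== PORT B =====
-- REGION_GROUPS: one row per (interconnection, region code, plants in the region)
def pvGroups : List (String × String × List String) := [
  ("West", "NW", ["Columbia Generating Station"]),
  ("West", "CAL", ["Diablo Canyon"]),
  ("West", "SW", ["Palo Verde"]),
  ("Texas", "TEX", ["Comanche Peak", "South Texas Project"]),
  ("East", "NE", ["Millstone", "Seabrook", "Pilgrim Nuclear Power Station"]),
  ("East", "NY", ["Indian Point 2", "Indian Point 3", "James A Fitzpatrick",
                  "R. E. Ginna Nuclear Power Plant", "Nine Mile Point Nuclear Station"]),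
  ("East", "FLA", ["St Lucie", "Turkey Point"]),
  ("East", "CENT", ["Cooper", "Wolf Creek Generating Station"]),
  ("East", "CAR", ["V C Summer", "Harris", "Oconee", "Catawba", "McGuire",
                   "H B Robinson", "Brunswick"]),
  ("East", "MIDW", ["Waterford 3", "Prairie Island", "Point Beach", "Monticello",
                    "Grand Gulf", "Donald C Cook", "Arkansas Nuclear One",
                    "Duane Arnold", "Callaway", "LaSalle Generating Station",
                    "River Bend Station"]),
  ("East", "SE", ["Vogtle", "Joseph M Farley", "Edwin I Hatch"]),
  ("East", "TEN", ["Sequoyah", "Watts Bar Nuclear Plant", "Browns Ferry"])]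

-- _INDEX = {p: (inter, code) for inter, code, group in REGION_GROUPS for p in group}
def pvIndex : PySem.Dict String (String × String) :=
  PySem.Dict.ofList (pvGroups.flatMap (fun g => g.2.2.map (fun p => (p, (g.1, g.2.1)))))

def assign_region_alt (plant : String) : String × String :=
  pvIndex.getD plant ("East", "MIDA")

-- ===== PRECONDITION & SPEC =====
def Spec_assign_region (plant : String) (out : String × String) : Prop := out = assign_region_alt plant
instance (plant : String) (out : String × String) : Decidable (Spec_assign_region plant out) := by unfold Spec_assign_region; infer_instance

-- ===== CLAIM (what is proved, stated in full; the proofs are below) =====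
def Claim_equal_assign_region : Prop := ∀ (plant : String), Dom_assign_region plant → Spec_assign_region plant (assign_region plant)

-- ===== LEMMAS AND PROOFS =====

-- flatten the nested mapping into one association list tagging each plant with its interconnection
def pvFlatten : List (String × PySem.Dict String String) → List (String × (String × String))
  | [] => []
  | (inter, plants) :: rest =>
      plants.items.map (fun p => (p.1, (inter, p.2))) ++ pvFlatten rest

theorem pvGetD_mk_cons (k x : String) (v : String × String)
    (rest : List (String × (String × String))) (d : String × String) :
    (PySem.Dict.mk ((k, v) :: rest)).getD x d
      = if k == x then v else (PySem.Dict.mk rest).getD x d := by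
  rw [PySem.Dict.getD_eq_get?_getD, PySem.Dict.get?_mk_cons]
  by_cases h : k == x <;> simp [h, PySem.Dict.getD_eq_get?_getD]

theorem pvGetD_mk_cons' (k x v : String)
    (rest : List (String × String)) (d : String) :
    (PySem.Dict.mk ((k, v) :: rest)).getD x d
      = if k == x then v else (PySem.Dict.mk rest).getD x d := by
  rw [PySem.Dict.getD_eq_get?_getD, PySem.Dict.get?_mk_cons]
  by_cases h : k == x <;> simp [h, PySem.Dict.getD_eq_get?_getD]

theorem pvContains_mk_cons (k x v : String) (rest : List (String × String)) :
    (PySem.Dict.mk ((k, v) :: rest)).contains x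
      = (k == x || (PySem.Dict.mk rest).contains x) := by
  rw [PySem.Dict.contains_eq_isSome_get?, PySem.Dict.get?_mk_cons,
      PySem.Dict.contains_eq_isSome_get?]
  by_cases h : k == x <;> simp [h]

-- one region's membership test + lookup equals a lookup in its tagged flat segment
theorem pvInnerStep (plant inter : String) (ps : List (String × String))
    (tail : List (String × (String × String))) (d : String × String) :
    (if (PySem.Dict.mk ps).contains plant
       then (inter, (PySem.Dict.mk ps).getD plant "MIDA")
       else (PySem.Dict.mk tail).getD plant d)
      = (PySem.Dict.mk (ps.map (fun p => (p.1, (inter, p.2))) ++ tail)).getD plant d := by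
  induction ps with
  | nil => simp
  | cons hd tl ih =>
      obtain ⟨k, v⟩ := hd
      rw [List.map_cons, List.cons_append, pvGetD_mk_cons, pvContains_mk_cons,
          pvGetD_mk_cons']
      by_cases h : k == plant
      · simp [h]
      · rw [Bool.not_eq_true] at h
        simp only [h, Bool.false_or, Bool.false_eq_true, if_false]
        exact ih

-- the whole loop is one lookup in the flattened association list
theorem pvLoop_eq_flat (plant : String) (L : List (String × PySem.Dict String String)) :
    pvARLoop plant L = (PySem.Dict.mk (pvFlatten L)).getD plant ("East", "MIDA") := by
  induction L with
  | nil =>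
      simp [pvARLoop, pvFlatten, PySem.Dict.getD_eq_get?_getD]
      rfl
  | cons hd tl ih =>
      obtain ⟨inter, plants⟩ := hd
      obtain ⟨ps⟩ := plants
      rw [pvARLoop, pvFlatten, ih]
      exact pvInnerStep plant inter ps (pvFlatten tl) ("East", "MIDA")

-- B's index, built from the grouped rows, lists exactly the same flat pairs
theorem pvIndex_eq_flat :
    pvIndex = PySem.Dict.mk (pvFlatten pvRegionMapping.items) := by
  apply PySem.Dict.ext
  simp [pvIndex, pvGroups, pvRegionMapping, pvFlatten, PySem.Dict.ofList,
        PySem.Dict.update, PySem.Dict.insert, PySem.Dict.contains, PySem.Dict.empty]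

-- ===== VERDICT (by name: the statement is the Claim_ definition above) =====
theorem assign_region_spec : Claim_equal_assign_region := by
  intro plant _
  unfold Spec_assign_region assign_region assign_region_alt
  rw [pvLoop_eq_flat, pvIndex_eq_flat]
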